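-- pv_equiv track=rewrite | github.com/bitshoroscope/google-challenge | src/level_4/bringing_a_gun_to_a_fight.py | __simmetry_pos
-- ===== SOURCE A (Python) =====
-- def __simmetry_pos(me, soldier, wall, power):
--     point = soldier
--     if point == 0:
--         return [i for i in range(soldier, soldier + power + wall, wall)]
--     inc_long = (wall - soldier) * 2
--     inc_short = soldier * 2
--     points = [soldier]
--     while point < me + power:
--         point += inc_long
--         __append_point(point, points, power, me)
--
--         point += inc_short
--         __append_point(point, points, power, me)
--     return points
--
-- def __append_point(point, points, power, start):
--     if (point <= start + power):
--         points.append(point)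
-- ===== SOURCE B (Python) =====
-- def __simmetry_pos(me, soldier, wall, power):
--     if soldier == 0:
--         return [i for i in range(soldier, soldier + power + wall, wall)]
--     limit = me + power
--     k = (limit - soldier - 1) // (2 * wall) + 1 if soldier < limit else 0
--     return [soldier] + [p for m in range(1, k + 1)
--                         for p in (2 * wall * m - soldier, 2 * wall * m + soldier)
--                         if p <= limit]
-- ===== Notes on version B (the rewrite author's own statement) =====
-- stated objective: simpler
-- what changed: Replaces the running-point while loop with a guarded append helper by a closed-form iteration count K and a direct comprehension over the mirror images 2*wall*m - soldier and 2*wall*m + soldier, filtered by the range bound.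
import Mathlib
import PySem

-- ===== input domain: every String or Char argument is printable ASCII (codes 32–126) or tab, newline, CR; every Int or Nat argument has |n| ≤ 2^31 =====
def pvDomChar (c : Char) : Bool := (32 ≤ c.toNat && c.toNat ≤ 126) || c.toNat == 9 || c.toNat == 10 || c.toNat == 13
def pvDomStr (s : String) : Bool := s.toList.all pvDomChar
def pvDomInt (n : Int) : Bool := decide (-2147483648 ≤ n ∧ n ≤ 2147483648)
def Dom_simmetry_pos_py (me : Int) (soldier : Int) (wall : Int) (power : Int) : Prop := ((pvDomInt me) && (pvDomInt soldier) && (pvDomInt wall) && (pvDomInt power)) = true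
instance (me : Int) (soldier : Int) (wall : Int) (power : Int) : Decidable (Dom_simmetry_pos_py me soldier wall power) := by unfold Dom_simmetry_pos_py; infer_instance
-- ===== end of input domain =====

-- B replaces A's running-point while loop with a closed-form iteration count and a
-- direct mirror-image comprehension (objective: simpler).

-- ===== PORT A =====
-- __append_point(point, points, power, start)
def pvAppendPoint (point : Int) (points : List Int) (power start : Int) : List Int :=
  if point ≤ start + power then points ++ [point] else points

-- A's while loop; fuel only makes the recursion total (the loop diverges outside Pre_).
def pvALoop (fuel : Nat) (point me power incLong incShort : Int) (points : List Int) : List Int :=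
  match fuel with
  | 0 => points
  | fuel + 1 =>
    if point < me + power then
      let p1 := point + incLong
      let pts1 := pvAppendPoint p1 points power me
      let p2 := p1 + incShort
      let pts2 := pvAppendPoint p2 pts1 power me
      pvALoop fuel p2 me power incLong incShort pts2
    else points

def simmetry_pos_py (me : Int) (soldier : Int) (wall : Int) (power : Int) : List Int :=
  if soldier = 0 then
    PySem.List.pyRange soldier (soldier + power + wall) wall
  else
    let incLong := (wall - soldier) * 2
    let incShort := soldier * 2
    pvALoop ((me + power - soldier).toNat + 1) soldier me power incLong incShort [soldier]

-- ===== PORT B =====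
def simmetry_pos_py_alt (me : Int) (soldier : Int) (wall : Int) (power : Int) : List Int :=
  if soldier = 0 then
    PySem.List.pyRange soldier (soldier + power + wall) wall
  else
    let limit := me + power
    let k : Int := if soldier < limit then PySem.Int.floordiv (limit - soldier - 1) (2 * wall) + 1 else 0
    soldier :: (PySem.List.pyRange 1 (k + 1) 1).flatMap
      (fun m => ([2 * wall * m - soldier, 2 * wall * m + soldier].filter (fun p => p ≤ limit)))

-- ===== PRECONDITION & SPEC =====
-- Pre_ excludes only inputs where A raises or diverges: soldier = 0 with wall = 0 is a
-- ValueError (range step 0); soldier ≠ 0 with wall ≤ 0 and soldier < me + power loops forever.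
def Pre_simmetry_pos_py (me : Int) (soldier : Int) (wall : Int) (power : Int) : Prop :=
  if soldier = 0 then wall ≠ 0 else (0 < wall ∨ me + power ≤ soldier)
instance (me : Int) (soldier : Int) (wall : Int) (power : Int) : Decidable (Pre_simmetry_pos_py me soldier wall power) := by unfold Pre_simmetry_pos_py; infer_instance
def pvWitness_simmetry_pos_py : Int × Int × Int × Int := (2, 1, 3, 4)

def Spec_simmetry_pos_py (me : Int) (soldier : Int) (wall : Int) (power : Int) (out : List Int) : Prop := out = simmetry_pos_py_alt me soldier wall power
instance (me : Int) (soldier : Int) (wall : Int) (power : Int) (out : List Int) : Decidable (Spec_simmetry_pos_py me soldier wall power out) := by unfold Spec_simmetry_pos_py; infer_instance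

-- ===== CLAIM (what is proved, stated in full; the proofs are below) =====
def Claim_equal_simmetry_pos_py : Prop := ∀ (me : Int) (soldier : Int) (wall : Int) (power : Int), Dom_simmetry_pos_py me soldier wall power → Pre_simmetry_pos_py me soldier wall power → Spec_simmetry_pos_py me soldier wall power (simmetry_pos_py me soldier wall power)

-- ===== LEMMAS AND PROOFS =====

-- i < K ↔ the loop at point 2*wall*i + soldier enters another iteration
theorem pvK_iff (limit soldier wall : Int) (hw : 0 < wall) (i : Int) (hi : 0 ≤ i) :
    (2 * wall * i + soldier < limit) ↔
    i < (if soldier < limit then PySem.Int.floordiv (limit - soldier - 1) (2 * wall) + 1 else 0) := by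
  split_ifs with hs
  · rw [PySem.Int.floordiv_eq_ediv_of_pos (show (0:Int) < 2*wall by omega)]
    have key : i ≤ (limit - soldier - 1) / (2*wall) ↔ i * (2*wall) ≤ limit - soldier - 1 :=
      Int.le_ediv_iff_mul_le (by omega)
    constructor
    · intro h
      have h2 : i * (2*wall) ≤ limit - soldier - 1 := by nlinarith
      have := key.mpr h2
      omega
    · intro h
      have h2 := key.mp (by omega)
      nlinarith
  · have h0 : 0 ≤ 2*wall*i := mul_nonneg (by omega) hi
    constructor
    · intro h; omega
    · intro h; omega

-- appending the two mirror candidates = appending the filtered pair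
theorem pvAppend_pair (me power a b : Int) (acc : List Int) :
    pvAppendPoint b (pvAppendPoint a acc power me) power me
      = acc ++ ([a, b].filter (fun p => p ≤ me + power)) := by
  unfold pvAppendPoint
  by_cases h1 : a ≤ me + power <;> by_cases h2 : b ≤ me + power <;> simp [h1, h2]

-- main loop invariant
theorem pvLoop_eq (me power soldier wall : Int)
    (K : Int) (hK : ∀ i : Int, 0 ≤ i → (2 * wall * i + soldier < me + power ↔ i < K)) :
    ∀ (fuel : Nat) (i : Int), 0 ≤ i → K - i ≤ (fuel : Int) →
    ∀ acc : List Int,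
    pvALoop fuel (2 * wall * i + soldier) me power ((wall - soldier) * 2) (soldier * 2) acc
      = acc ++ (PySem.List.pyRange (i + 1) (K + 1) 1).flatMap
          (fun m => ([2 * wall * m - soldier, 2 * wall * m + soldier].filter (fun p => p ≤ me + power))) := by
  intro fuel
  induction fuel with
  | zero =>
    intro i hi hf acc
    have : ¬ (i < K) := by omega
    rw [PySem.List.pyRange_one_eq_nil (by omega)]
    simp [pvALoop]
  | succ n ih =>
    intro i hi hf acc
    by_cases h : 2 * wall * i + soldier < me + power
    · have hiK : i < K := (hK i hi).1 h
      rw [pvALoop]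
      simp only [if_pos h]
      have hpt : 2 * wall * i + soldier + (wall - soldier) * 2 + soldier * 2 = 2 * wall * (i+1) + soldier := by ring
      have := ih (i+1) (by omega) (by omega)
        (pvAppendPoint (2 * wall * (i+1) + soldier)
          (pvAppendPoint (2 * wall * (i+1) - soldier) acc power me) power me)
      rw [show 2 * wall * i + soldier + (wall - soldier) * 2 = 2 * wall * (i+1) - soldier from by ring,
          show 2 * wall * (i+1) - soldier + soldier * 2 = 2 * wall * (i+1) + soldier from by ring]
      rw [PySem.List.pyRange_one_cons (show i + 1 < K + 1 by omega), List.flatMap_cons]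
      rw [this, pvAppend_pair, List.append_assoc]
    · have hiK : ¬ (i < K) := fun hlt => h ((hK i hi).2 hlt)
      rw [pvALoop]
      simp only [if_neg h]
      rw [PySem.List.pyRange_one_eq_nil (by omega)]
      simp

-- ===== VERDICT (by name: the statement is the Claim_ definition above) =====
theorem simmetry_pos_py_spec : Claim_equal_simmetry_pos_py := by
  intro me soldier wall power _hdom hpre
  unfold Spec_simmetry_pos_py simmetry_pos_py simmetry_pos_py_alt
  by_cases hs : soldier = 0
  · simp [hs]
  · simp only [if_neg hs]
    unfold Pre_simmetry_pos_py at hpre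
    rw [if_neg hs] at hpre
    set K : Int := if soldier < me + power then PySem.Int.floordiv (me + power - soldier - 1) (2 * wall) + 1 else 0 with hKdef
    by_cases hw : 0 < wall
    · have hK : ∀ i : Int, 0 ≤ i → (2 * wall * i + soldier < me + power ↔ i < K) := by
        intro i hi; exact pvK_iff (me + power) soldier wall hw i hi
      have hKbound : K ≤ (me + power - soldier).toNat + 1 := by
        by_cases hs2 : soldier < me + power
        · rw [hKdef, if_pos hs2, PySem.Int.floordiv_eq_ediv_of_pos (by omega)]
          have h1 : (me + power - soldier - 1) / (2*wall) ≤ (me + power - soldier - 1) := by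
            apply Int.ediv_le_self; omega
          omega
        · rw [hKdef, if_neg hs2]; omega
      have := pvLoop_eq me power soldier wall K hK ((me + power - soldier).toNat + 1) 0 le_rfl
        (by push_cast; omega) [soldier]
      rw [show 2 * wall * 0 + soldier = soldier from by ring] at this
      rw [this]
      simp [PySem.List.pyRange]
    · -- wall ≤ 0: Pre_ forces me + power ≤ soldier, so the loop never runs and K = 0
      have hle : me + power ≤ soldier := by omega
      have hK0 : K = 0 := by rw [hKdef, if_neg (by omega)]
      rw [hK0]
      rw [show ((me + power - soldier).toNat + 1) = Nat.succ (me + power - soldier).toNat from rfl]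
      rw [pvALoop]
      rw [if_neg (by omega)]
      rw [PySem.List.pyRange_one_eq_nil (by omega)]
      simp
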